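-- pv_equiv track=rewrite | github.com/ram-elgov/cs1001py | hw/hw4/munch.py | winnable
-- ===== SOURCE A (Python) =====
-- def winnable(board):
--     """ determines if in a given configuration, represented by board,
--         the player who makes the current move can force a win.
--         board[i] is the height of column i
--         show: if True and the configuration can force win,
--         a possible move printed.
--     """
--     if sum(board) == 0:  # halting after the (losing) move (0,0)
--         return True
--
--     m = len(board)
--
--     for i in range(m):  # for every column i
--         for j in range(board[i]):  # for every possible cell (i,j)
--             # generate new munched board
--             munched_board = board[0:i] + [min(board[k], j) for k in range(i, m)]
--
--             # recursion
--             if not winnable(munched_board):  # if munched board is losing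
--                 return True
--
--     return False  # current board cannot force win
-- ===== SOURCE B (Python) =====
-- def winnable(board):
--     """Same game-tree result as the naive version, but each distinct board
--     is solved once: dynamic programming with a memo keyed by the board tuple."""
--     memo = {}
--
--     def solve(b):
--         if sum(b) == 0:
--             return True
--         key = tuple(b)
--         if key in memo:
--             return memo[key]
--         res = False
--         for i in range(len(b)):
--             for j in range(b[i]):
--                 if not solve(b[:i] + [min(h, j) for h in b[i:]]):
--                     res = True
--                     break
--             if res:
--                 break
--         memo[key] = res
--         return res
--
--     return solve(list(board))
-- ===== Notes on version B (the rewrite author's own statement) =====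
-- stated objective: alternative
-- what changed: B replaces A's naive game-tree recursion, which re-solves equal boards repeatedly, with memoized dynamic programming: each distinct board state is solved once and cached in a dict keyed by the board tuple.
import Mathlib
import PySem

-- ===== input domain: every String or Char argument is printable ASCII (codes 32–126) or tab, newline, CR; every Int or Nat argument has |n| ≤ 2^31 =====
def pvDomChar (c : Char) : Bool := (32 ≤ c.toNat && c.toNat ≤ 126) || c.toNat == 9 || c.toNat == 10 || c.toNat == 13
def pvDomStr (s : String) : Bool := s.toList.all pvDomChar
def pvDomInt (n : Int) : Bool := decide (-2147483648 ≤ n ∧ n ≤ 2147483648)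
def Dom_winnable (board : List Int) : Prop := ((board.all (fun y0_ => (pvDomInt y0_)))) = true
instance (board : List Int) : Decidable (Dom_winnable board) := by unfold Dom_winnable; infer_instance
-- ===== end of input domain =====

-- B memoizes the game search on the board (one result per distinct board state)
-- instead of A's naive recursion re-solving equal boards; return values are identical.

-- shared move arithmetic: board[0:i] + [min(board[k], j) for k in range(i, m)]
def pvMunch (board : List Int) (i : Nat) (j : Int) : List Int :=
  board.take i ++ (board.drop i).map (fun h => min h j)

-- termination measure: total number of remaining cells (negative heights count 0)
def pvN (b : List Int) : Nat := (b.map Int.toNat).sum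

theorem pvSumMinLe (j : Int) (l : List Int) :
    ((l.map (fun h => min h j)).map Int.toNat).sum ≤ (l.map Int.toNat).sum := by
  induction l with
  | nil => simp
  | cons x xs ih =>
    simp only [List.map_cons, List.sum_cons]
    have : (min x j).toNat ≤ x.toNat := by
      rcases le_total x j with h | h
      · simp [min_eq_left h]
      · have := Int.toNat_le_toNat (min_le_left x j); omega
    omega

theorem pvMunch_lt (b : List Int) (i : Nat) (j : Int)
    (hi : i < b.length) (hj0 : 0 ≤ j) (hj : j < b.getD i 0) :
    pvN (pvMunch b i j) < pvN b := by
  have hsplit : b = b.take i ++ b.drop i := (List.take_append_drop i b).symm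
  have hdrop : b.drop i = b[i] :: b.drop (i + 1) := List.drop_eq_getElem_cons hi
  have hget : b.getD i 0 = b[i] := List.getD_eq_getElem b 0 hi
  have hNb : pvN b = pvN (b.take i) + pvN (b.drop i) := by
    conv_lhs => rw [hsplit]
    simp [pvN]
  have hNm : pvN (pvMunch b i j) =
      pvN (b.take i) + (((b.drop i).map (fun h => min h j)).map Int.toNat).sum := by
    simp [pvMunch, pvN]
  rw [hNm, hNb, hdrop]
  simp only [List.map_cons, List.sum_cons, pvN]
  have htail := pvSumMinLe j (b.drop (i + 1))
  have hhead : (min b[i] j).toNat < b[i].toNat := by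
    rw [hget] at hj
    rw [min_eq_right (le_of_lt hj)]
    omega
  omega

-- ===== PORT A =====
-- A's two for-loops with early 'return True' become two counter recursions
-- (the j loop counts up lazily, exactly like Python's range iterator).
mutual
def winnable (board : List Int) : Bool :=
  if board.sum = 0 then true
  else winnableOuter board 0
termination_by (pvN board, 2, 0)
decreasing_by
  apply Prod.Lex.right; apply Prod.Lex.left; omega

-- 'for i in range(m):' from index i on; falls through to 'return False'
def winnableOuter (board : List Int) (i : Nat) : Bool :=
  if h : i < board.length then
    if winnableInner board i h 0 then true
    else winnableOuter board (i + 1)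
  else false
termination_by (pvN board, 1, board.length - i)
decreasing_by
  · apply Prod.Lex.right; apply Prod.Lex.left; omega
  · apply Prod.Lex.right; apply Prod.Lex.right; omega

-- 'for j in range(board[i]):' from value j on (j counts up, never negative)
def winnableInner (board : List Int) (i : Nat) (h : i < board.length) (j : Nat) : Bool :=
  if hlt : (j : Int) < board.getD i 0 then
    if ! winnable (pvMunch board i (j : Int)) then true
    else winnableInner board i h (j + 1)
  else false
termination_by (pvN board, 0, (board.getD i 0 - j).toNat)
decreasing_by
  · apply Prod.Lex.left
    exact pvMunch_lt board i (j : Int) h (by omega) hlt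
  · apply Prod.Lex.right; apply Prod.Lex.right; omega
end

-- ===== PORT B =====
-- memo threaded through the same loop structure; results cached per board
mutual
def pvSolve (b : List Int) (memo : PySem.Dict (List Int) Bool) :
    Bool × PySem.Dict (List Int) Bool :=
  if b.sum = 0 then (true, memo)
  else
    match memo.get? b with
    | some v => (v, memo)
    | none =>
        let r := pvSolveOuter b 0 memo
        (r.1, r.2.insert b r.1)
termination_by (pvN b, 2, 0)
decreasing_by
  apply Prod.Lex.right; apply Prod.Lex.left; omega

def pvSolveOuter (b : List Int) (i : Nat) (memo : PySem.Dict (List Int) Bool) :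
    Bool × PySem.Dict (List Int) Bool :=
  if h : i < b.length then
    let r := pvSolveInner b i h 0 memo
    if r.1 then r else pvSolveOuter b (i + 1) r.2
  else (false, memo)
termination_by (pvN b, 1, b.length - i)
decreasing_by
  · apply Prod.Lex.right; apply Prod.Lex.left; omega
  · apply Prod.Lex.right; apply Prod.Lex.right; omega

def pvSolveInner (b : List Int) (i : Nat) (h : i < b.length)
    (j : Nat) (memo : PySem.Dict (List Int) Bool) :
    Bool × PySem.Dict (List Int) Bool :=
  if hlt : (j : Int) < b.getD i 0 then
    let r := pvSolve (pvMunch b i (j : Int)) memo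
    if !r.1 then (true, r.2)
    else pvSolveInner b i h (j + 1) r.2
  else (false, memo)
termination_by (pvN b, 0, (b.getD i 0 - j).toNat)
decreasing_by
  · apply Prod.Lex.left
    exact pvMunch_lt b i (j : Int) h (by omega) hlt
  · apply Prod.Lex.right; apply Prod.Lex.right; omega
end

def winnable_alt (board : List Int) : Bool :=
  (pvSolve board PySem.Dict.empty).1

-- ===== PRECONDITION & SPEC =====
def Spec_winnable (board : List Int) (out : Bool) : Prop := out = winnable_alt board
instance (board : List Int) (out : Bool) : Decidable (Spec_winnable board out) := by unfold Spec_winnable; infer_instance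

-- ===== CLAIM (what is proved, stated in full; the proofs are below) =====
def Claim_equal_winnable : Prop := ∀ (board : List Int), Dom_winnable board → Spec_winnable board (winnable board)

-- ===== LEMMAS AND PROOFS =====

-- memo invariant: every stored value is the naive answer for its key
def pvInv (memo : PySem.Dict (List Int) Bool) : Prop :=
  ∀ k v, memo.get? k = some v → v = winnable k

theorem pvSolveInner_spec (b : List Int) (i : Nat) (h : i < b.length)
    (IH : ∀ (b' : List Int) (memo' : PySem.Dict (List Int) Bool), pvN b' < pvN b →
      pvInv memo' → (pvSolve b' memo').1 = winnable b' ∧ pvInv (pvSolve b' memo').2) :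
    ∀ (K : Nat) (j : Nat) (memo : PySem.Dict (List Int) Bool),
      (b.getD i 0 - j).toNat ≤ K → pvInv memo →
      (pvSolveInner b i h j memo).1 = winnableInner b i h j ∧
      pvInv (pvSolveInner b i h j memo).2 := by
  intro K
  induction K with
  | zero =>
    intro j memo hK hInv
    have hge : ¬ (j : Int) < b.getD i 0 := by omega
    rw [pvSolveInner, winnableInner, dif_neg hge, dif_neg hge]
    exact ⟨rfl, hInv⟩
  | succ K ihK =>
    intro j memo hK hInv
    rw [pvSolveInner, winnableInner]
    by_cases hlt : (j : Int) < b.getD i 0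
    · rw [dif_pos hlt, dif_pos hlt]
      have hrec := IH (pvMunch b i (j : Int)) memo (pvMunch_lt b i (j : Int) h (by omega) hlt) hInv
      by_cases hr : (pvSolve (pvMunch b i (j : Int)) memo).1
      · have := ihK (j + 1) (pvSolve (pvMunch b i (j : Int)) memo).2 (by omega) hrec.2
        simp [hr, hrec.1.symm, this.1, this.2]
      · simp only [Bool.not_eq_true] at hr
        simp [hr, hrec.1.symm, hrec.2]
    · rw [dif_neg hlt, dif_neg hlt]
      exact ⟨rfl, hInv⟩

theorem pvSolveOuter_spec (b : List Int)
    (IH : ∀ (b' : List Int) (memo' : PySem.Dict (List Int) Bool), pvN b' < pvN b →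
      pvInv memo' → (pvSolve b' memo').1 = winnable b' ∧ pvInv (pvSolve b' memo').2) :
    ∀ (K : Nat) (i : Nat) (memo : PySem.Dict (List Int) Bool),
      b.length - i ≤ K → pvInv memo →
      (pvSolveOuter b i memo).1 = winnableOuter b i ∧
      pvInv (pvSolveOuter b i memo).2 := by
  intro K
  induction K with
  | zero =>
    intro i memo hK hInv
    have hge : ¬ i < b.length := by omega
    rw [pvSolveOuter, winnableOuter, dif_neg hge, dif_neg hge]
    exact ⟨rfl, hInv⟩
  | succ K ihK =>
    intro i memo hK hInv
    rw [pvSolveOuter, winnableOuter]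
    by_cases h : i < b.length
    · rw [dif_pos h, dif_pos h]
      have hin := pvSolveInner_spec b i h IH (b.getD i 0 - (0:Nat)).toNat 0 memo (le_refl _) hInv
      by_cases hr : (pvSolveInner b i h 0 memo).1
      · simp [hr, hin.1.symm, hin.2]
      · have := ihK (i + 1) (pvSolveInner b i h 0 memo).2 (by omega) hin.2
        simp only [Bool.not_eq_true] at hr
        simp [hr, hin.1.symm, this.1, this.2]
    · rw [dif_neg h, dif_neg h]
      exact ⟨rfl, hInv⟩

theorem pvSolve_spec (n : Nat) : ∀ (b : List Int) (memo : PySem.Dict (List Int) Bool),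
    pvN b < n → pvInv memo →
    (pvSolve b memo).1 = winnable b ∧ pvInv (pvSolve b memo).2 := by
  induction n with
  | zero => intro b memo h; omega
  | succ n ihn =>
    intro b memo hn hInv
    rw [pvSolve]
    by_cases hs : b.sum = 0
    · rw [if_pos hs, winnable, if_pos hs]
      exact ⟨rfl, hInv⟩
    · have hw : winnable b = winnableOuter b 0 := by rw [winnable, if_neg hs]
      rw [if_neg hs]
      cases hget : memo.get? b with
      | some v =>
        exact ⟨by rw [hw]; simpa [hw] using hInv b v hget, hInv⟩
      | none =>
        have IH : ∀ (b' : List Int) (memo' : PySem.Dict (List Int) Bool), pvN b' < pvN b →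
            pvInv memo' → (pvSolve b' memo').1 = winnable b' ∧ pvInv (pvSolve b' memo').2 :=
          fun b' memo' hlt hI => ihn b' memo' (by omega) hI
        have hout := pvSolveOuter_spec b IH (b.length - (0:Nat)) 0 memo (le_refl _) hInv
        have hres : (pvSolveOuter b 0 memo).1 = winnable b := by rw [hout.1, hw]
        refine ⟨hres, ?_⟩
        intro k v hk
        rw [PySem.Dict.get?_insert] at hk
        split at hk
        · next heq =>
          subst heq
          rw [← hres]
          exact (Option.some_inj.mp hk).symm
        · exact hout.2 k v hk

-- ===== VERDICT (by name: the statement is the Claim_ definition above) =====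
theorem winnable_spec : Claim_equal_winnable := by
  intro board _
  unfold Spec_winnable winnable_alt
  have := pvSolve_spec (pvN board + 1) board PySem.Dict.empty (by omega)
    (fun k v h => by simp [PySem.Dict.get?_empty] at h)
  exact this.1.symm
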